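-- pv_equiv track=rewrite | github.com/bconfiden2/daily-ps | programmers/kakao/72411.py | check
-- ===== SOURCE A (Python) =====
-- def check(target, orders):
--     cnt = 0
--     for order in orders:
--         for t in target:
--             if t not in order:
--                 break
--         else:
--             cnt += 1
--     return cnt
-- ===== SOURCE B (Python) =====
-- def check(target, orders):
--     candidates = list(orders)
--     for t in target:
--         candidates = [o for o in candidates if t in o]
--     return len(candidates)
-- ===== Notes on version B (the rewrite author's own statement) =====
-- stated objective: alternative
-- what changed: Transposed the computation: instead of testing each order against every target character with a break/else inner loop and a counter, B iterates target-major, maintaining a shrinking candidate list that it progressively filters by each character, and returns its final length.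
import Mathlib
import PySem

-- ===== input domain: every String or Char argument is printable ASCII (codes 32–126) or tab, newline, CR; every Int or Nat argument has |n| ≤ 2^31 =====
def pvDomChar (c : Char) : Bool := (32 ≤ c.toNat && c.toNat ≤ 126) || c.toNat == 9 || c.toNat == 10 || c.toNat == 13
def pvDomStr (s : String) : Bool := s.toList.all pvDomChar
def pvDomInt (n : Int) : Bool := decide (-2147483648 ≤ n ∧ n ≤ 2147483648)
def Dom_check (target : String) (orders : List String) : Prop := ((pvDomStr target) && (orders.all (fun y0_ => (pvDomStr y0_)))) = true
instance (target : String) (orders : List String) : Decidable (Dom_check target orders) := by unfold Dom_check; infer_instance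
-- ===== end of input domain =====

-- B replaces A's per-order all-characters scan (counter + break/else) by a target-major
-- progressive filter of a shrinking candidate list; alternative decomposition, same cost.


-- ===== PORT A =====
-- inner `for t in target: if t not in order: break / else:` — returns true iff the loop
-- finishes without break; `t in order` with t a single char is exactly char membership.
def checkInner (order : List Char) : List Char → Bool
  | [] => true
  | t :: ts => if !(order.contains t) then false else checkInner order ts

def check (target : String) (orders : List String) : Int :=
  orders.foldl (fun cnt order => if checkInner order.toList target.toList then cnt + 1 else cnt) 0

-- ===== PORT B =====
def check_alt (target : String) (orders : List String) : Int :=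
  ((target.toList.foldl (fun cand t => cand.filter (fun o => o.toList.contains t)) orders).length : Int)

-- ===== PRECONDITION & SPEC =====
def Spec_check (target : String) (orders : List String) (out : Int) : Prop := out = check_alt target orders
instance (target : String) (orders : List String) (out : Int) : Decidable (Spec_check target orders out) := by unfold Spec_check; infer_instance

-- ===== CLAIM (what is proved, stated in full; the proofs are below) =====
def Claim_equal_check : Prop := ∀ (target : String) (orders : List String), Dom_check target orders → Spec_check target orders (check target orders)

-- ===== LEMMAS AND PROOFS =====

theorem checkInner_eq_all (order : List Char) (ts : List Char) :
    checkInner order ts = ts.all (fun t => order.contains t) := by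
  induction ts with
  | nil => rfl
  | cons t ts ih =>
    by_cases h : order.contains t = true <;> simp [checkInner, List.all_cons, ih, h]

theorem foldl_filter_eq (ts : List Char) (os : List String) :
    ts.foldl (fun cand t => cand.filter (fun o => o.toList.contains t)) os
      = os.filter (fun o => ts.all (fun t => o.toList.contains t)) := by
  induction ts generalizing os with
  | nil => simp
  | cons t ts ih =>
    simp only [List.foldl_cons, ih, List.filter_filter, List.all_cons]
    exact List.filter_congr (fun o _ => by rw [Bool.and_comm])

theorem foldl_count_eq (b : String → Bool) (os : List String) (c : Int) :
    os.foldl (fun cnt o => if b o then cnt + 1 else cnt) c = c + ((os.filter b).length : Int) := by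
  induction os generalizing c with
  | nil => simp
  | cons o os ih =>
    by_cases h : b o = true <;> simp [h, ih] <;> ring

-- ===== VERDICT (by name: the statement is the Claim_ definition above) =====
theorem check_spec : Claim_equal_check := by
  intro target orders _
  unfold Spec_check check check_alt
  rw [foldl_filter_eq, foldl_count_eq]
  simp [checkInner_eq_all]
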